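-- pv_equiv track=rewrite | github.com/johnnyjvang/tb3_nav2_slam | tb3_nav2_slam/random_safe_goal_explorer.py | is_safe_cell
-- ===== SOURCE A (Python) =====
-- def is_safe_cell(x_idx, y_idx, width, height, data, radius_cells):
--
--     for dx in range(-radius_cells, radius_cells + 1):
--         for dy in range(-radius_cells, radius_cells + 1):
--
--             nx = x_idx + dx
--             ny = y_idx + dy
--
--             if nx < 0 or ny < 0 or nx >= width or ny >= height:
--                 return False
--
--             index = ny * width + nx
--
--             if data[index] != 0:
--                 return False
--
--     return True
-- ===== SOURCE B (Python) =====
-- def is_safe_cell(x_idx, y_idx, width, height, data, radius_cells):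
--     # Axis-wise bounds test on the square's extremes, then one flat scan of the
--     # occupancy data: reject if any nonzero cell decodes (via divmod) into the square.
--     if radius_cells < 0:
--         return True
--     if x_idx - radius_cells < 0 or y_idx - radius_cells < 0:
--         return False
--     if x_idx + radius_cells >= width or y_idx + radius_cells >= height:
--         return False
--     for i, v in enumerate(data):
--         if v != 0:
--             ny, nx = divmod(i, width)
--             if abs(nx - x_idx) <= radius_cells and abs(ny - y_idx) <= radius_cells:
--                 return False
--     return True
-- ===== Notes on version B (the rewrite author's own statement) =====
-- stated objective: alternative
-- what changed: Instead of scanning the (2r+1)^2 square cell by cell, B does an O(1) axis-wise bounds test on the square's extremes and then a single flat pass over the occupancy array, decoding each nonzero entry's index with divmod and rejecting if it lands inside the square.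
-- outside the precondition, e.g. on is_safe_cell(1, 1, 3, 2, [0, 0, 0, 0], 1): A returns False, B returns False; on is_safe_cell(1, 1, 3, 3, [0], 1): A raises IndexError, B returns True
import Mathlib
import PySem

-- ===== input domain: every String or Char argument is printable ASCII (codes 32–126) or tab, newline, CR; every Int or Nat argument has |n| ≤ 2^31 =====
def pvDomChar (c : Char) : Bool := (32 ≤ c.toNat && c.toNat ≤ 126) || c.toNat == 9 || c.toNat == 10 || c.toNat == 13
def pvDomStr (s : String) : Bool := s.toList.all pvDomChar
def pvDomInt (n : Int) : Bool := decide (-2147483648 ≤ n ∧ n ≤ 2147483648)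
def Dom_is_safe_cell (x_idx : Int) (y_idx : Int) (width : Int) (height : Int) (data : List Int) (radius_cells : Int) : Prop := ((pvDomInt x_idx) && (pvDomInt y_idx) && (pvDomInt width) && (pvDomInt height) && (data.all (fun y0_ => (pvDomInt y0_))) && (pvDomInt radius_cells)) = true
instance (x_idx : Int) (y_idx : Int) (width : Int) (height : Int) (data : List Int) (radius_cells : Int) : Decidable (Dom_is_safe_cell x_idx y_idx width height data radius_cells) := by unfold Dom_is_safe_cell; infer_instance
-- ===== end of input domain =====

-- B replaces A's per-cell scan of the square by an O(1) axis-wise bounds test plus a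
-- single flat pass over the data array, decoding each nonzero entry's index with divmod
-- and rejecting if it lands inside the square (alternative traversal, same result).

-- ===== PORT A =====
-- inner 'for dy in range(-radius_cells, radius_cells+1)' loop (lazy, early return False),
-- as counter recursion on dy; data[index]: Pre_ keeps the index in range, default never read
def isSafeInnerA (x_idx y_idx width height : Int) (data : List Int) (radius_cells : Int) (dx dy : Int) : Bool :=
  if dy < radius_cells + 1 then
    let nx := x_idx + dx
    let ny := y_idx + dy
    if nx < 0 || ny < 0 || width ≤ nx || height ≤ ny then false
    else
      let index := ny * width + nx
      if PySem.List.pyGetD data index 0 ≠ 0 then false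
      else isSafeInnerA x_idx y_idx width height data radius_cells dx (dy + 1)
  else true
termination_by (radius_cells + 1 - dy).toNat
decreasing_by omega

-- outer 'for dx in range(-radius_cells, radius_cells+1)' loop
def isSafeOuterA (x_idx y_idx width height : Int) (data : List Int) (radius_cells : Int) (dx : Int) : Bool :=
  if dx < radius_cells + 1 then
    if isSafeInnerA x_idx y_idx width height data radius_cells dx (-radius_cells) then
      isSafeOuterA x_idx y_idx width height data radius_cells (dx + 1)
    else false
  else true
termination_by (radius_cells + 1 - dx).toNat
decreasing_by omega

def is_safe_cell (x_idx : Int) (y_idx : Int) (width : Int) (height : Int) (data : List Int) (radius_cells : Int) : Bool :=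
  isSafeOuterA x_idx y_idx width height data radius_cells (-radius_cells)

-- ===== PORT B =====
-- the 'for i, v in enumerate(data): … return False / return True' loop = all over enumerate;
-- divmod(i, width) ported as (floordiv, mod): width > 0 whenever this branch is reached
-- (the axis-wise bounds test passed), so this is exact there
def is_safe_cell_alt (x_idx : Int) (y_idx : Int) (width : Int) (height : Int) (data : List Int) (radius_cells : Int) : Bool :=
  if radius_cells < 0 then true
  else if x_idx - radius_cells < 0 || y_idx - radius_cells < 0 then false
  else if width ≤ x_idx + radius_cells || height ≤ y_idx + radius_cells then false
  else
    (PySem.List.enumerate data 0).all fun iv =>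
      if iv.2 ≠ 0 then
        let ny := PySem.Int.floordiv iv.1 width
        let nx := PySem.Int.mod iv.1 width
        !(decide (((nx - x_idx).natAbs : Int) ≤ radius_cells) &&
          decide (((ny - y_idx).natAbs : Int) ≤ radius_cells))
      else true

-- ===== PRECONDITION & SPEC =====
-- Pre_ excludes data shorter than the width*height grid (there A can raise IndexError),
-- except when A provably returns before ever indexing: an empty square (negative radius)
-- or a first scanned cell (x-r, y-r) already out of bounds; it still conservatively
-- excludes some short-data inputs on which a later bounds check fires before the bad index.
def Pre_is_safe_cell (x_idx : Int) (y_idx : Int) (width : Int) (height : Int) (data : List Int) (radius_cells : Int) : Prop :=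
  width * height ≤ (data.length : Int) ∨ radius_cells < 0 ∨
  x_idx - radius_cells < 0 ∨ y_idx - radius_cells < 0 ∨
  width ≤ x_idx - radius_cells ∨ height ≤ y_idx - radius_cells
instance (x_idx : Int) (y_idx : Int) (width : Int) (height : Int) (data : List Int) (radius_cells : Int) : Decidable (Pre_is_safe_cell x_idx y_idx width height data radius_cells) := by unfold Pre_is_safe_cell; infer_instance

def pvWitness_is_safe_cell : Int × Int × Int × Int × List Int × Int := (1, 1, 3, 3, [0,0,0,0,0,0,0,0,0], 1)

def Spec_is_safe_cell (x_idx : Int) (y_idx : Int) (width : Int) (height : Int) (data : List Int) (radius_cells : Int) (out : Bool) : Prop := out = is_safe_cell_alt x_idx y_idx width height data radius_cells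
instance (x_idx : Int) (y_idx : Int) (width : Int) (height : Int) (data : List Int) (radius_cells : Int) (out : Bool) : Decidable (Spec_is_safe_cell x_idx y_idx width height data radius_cells out) := by unfold Spec_is_safe_cell; infer_instance

-- ===== CLAIM (what is proved, stated in full; the proofs are below) =====
def Claim_equal_is_safe_cell : Prop := ∀ (x_idx : Int) (y_idx : Int) (width : Int) (height : Int) (data : List Int) (radius_cells : Int), Dom_is_safe_cell x_idx y_idx width height data radius_cells → Pre_is_safe_cell x_idx y_idx width height data radius_cells → Spec_is_safe_cell x_idx y_idx width height data radius_cells (is_safe_cell x_idx y_idx width height data radius_cells)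

-- ===== LEMMAS AND PROOFS =====

-- per-cell check of A, as a pure predicate
def cellA (x_idx y_idx width height : Int) (data : List Int) (dx dy : Int) : Bool :=
  let nx := x_idx + dx
  let ny := y_idx + dy
  !(nx < 0 || ny < 0 || width ≤ nx || height ≤ ny) && (PySem.List.pyGetD data (ny * width + nx) 0 == 0)

theorem innerA_eq_all (x y w h : Int) (data : List Int) (r dx : Int) :
    ∀ (n : Nat) (dy0 : Int), n = (r + 1 - dy0).toNat →
      isSafeInnerA x y w h data r dx dy0 =
        (PySem.List.pyRange dy0 (r + 1) 1).all (cellA x y w h data dx) := by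
  intro n
  induction n with
  | zero =>
    intro dy0 hn
    rw [isSafeInnerA, if_neg (by omega), PySem.List.pyRange_one_eq_nil (by omega)]
    rfl
  | succ n ih =>
    intro dy0 hn
    have hlt : dy0 < r + 1 := by omega
    rw [isSafeInnerA, if_pos hlt, PySem.List.pyRange_one_cons hlt]
    simp only [List.all_cons, cellA]
    split_ifs with h1 h2
    · simp [h1]
    · simp [h2]
    · simp only [ih (dy0 + 1) (by omega)]
      simp_all

theorem outerA_eq_all (x y w h : Int) (data : List Int) (r : Int) :
    ∀ (n : Nat) (dx0 : Int), n = (r + 1 - dx0).toNat →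
      isSafeOuterA x y w h data r dx0 =
        (PySem.List.pyRange dx0 (r + 1) 1).all
          (fun dx => (PySem.List.pyRange (-r) (r + 1) 1).all (cellA x y w h data dx)) := by
  intro n
  induction n with
  | zero =>
    intro dx0 hn
    rw [isSafeOuterA, if_neg (by omega), PySem.List.pyRange_one_eq_nil (by omega)]
    rfl
  | succ n ih =>
    intro dx0 hn
    have hlt : dx0 < r + 1 := by omega
    rw [isSafeOuterA, if_pos hlt, PySem.List.pyRange_one_cons hlt]
    simp only [List.all_cons, innerA_eq_all x y w h data r dx0 _ (-r) rfl,
      ih (dx0 + 1) (by omega)]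
    split_ifs with h1 <;> simp_all

theorem is_safe_cell_spec : Claim_equal_is_safe_cell := by
  intro x y w h data r _ hpre
  unfold Spec_is_safe_cell
  unfold is_safe_cell is_safe_cell_alt
  rw [outerA_eq_all x y w h data r _ (-r) rfl]
  by_cases hr : r < 0
  · rw [PySem.List.pyRange_one_eq_nil (by omega)]
    simp [hr]
  · push_neg at hr
    simp only [if_neg (by omega : ¬ r < 0)]
    have hmem : ∀ a : Int, a ∈ PySem.List.pyRange (-r) (r + 1) 1 ↔ -r ≤ a ∧ a < r + 1 := fun a =>
      PySem.List.mem_pyRange_one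
    by_cases hb1 : x - r < 0 ∨ y - r < 0
    · rw [if_pos (by rcases hb1 with hb | hb <;> simp [hb])]
      rw [List.all_eq_false]
      refine ⟨-r, (hmem _).mpr (by omega), ?_⟩
      rw [Bool.not_eq_true, List.all_eq_false]
      refine ⟨-r, (hmem _).mpr (by omega), ?_⟩
      simp only [cellA, Bool.not_eq_true, Bool.and_eq_false_iff, Bool.not_eq_false',
        Bool.or_eq_true, decide_eq_true_eq]
      left; omega
    · push_neg at hb1
      rw [if_neg (by simp; omega)]
      by_cases hb2 : w ≤ x + r ∨ h ≤ y + r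
      · rw [if_pos (by rcases hb2 with hb | hb <;> simp [hb])]
        rw [List.all_eq_false]
        refine ⟨r, (hmem _).mpr (by omega), ?_⟩
        rw [Bool.not_eq_true, List.all_eq_false]
        refine ⟨r, (hmem _).mpr (by omega), ?_⟩
        simp only [cellA, Bool.not_eq_true, Bool.and_eq_false_iff, Bool.not_eq_false',
          Bool.or_eq_true, decide_eq_true_eq]
        left; omega
      · push_neg at hb2
        rw [if_neg (by simp; omega)]
        -- bounds all pass: 0 ≤ x-r, 0 ≤ y-r, x+r < w, y+r < h, so 0 < w and w*h ≤ len
        have hw : 0 < w := by omega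
        have hlen : w * h ≤ (data.length : Int) := by
          rcases hpre with hl | hl | hl | hl | hl | hl <;> first | exact hl | omega
        -- common form: every cell of the square holds a zero
        have hiff : ∀ (P Q : Bool), (P = true ↔ Q = true) → P = Q := by decide
        apply hiff
        rw [List.all_eq_true, List.all_eq_true]
        constructor
        · -- square scan safe → flat scan safe
          intro H iv hiv
          obtain ⟨k, hk, rfl⟩ := (PySem.List.mem_enumerate_iff _ _ _).mp hiv
          simp only [zero_add]
          by_cases hv : data[k] = 0
          · simp [hv]
          · rw [if_pos (by simpa using hv)]
            simp only [Bool.not_eq_eq_eq_not, Bool.not_true, Bool.and_eq_false_iff,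
              decide_eq_false_iff_not]
            by_contra hcon
            push_neg at hcon
            obtain ⟨h1, h2⟩ := hcon
            have hmn : 0 ≤ PySem.Int.mod (k : Int) w := PySem.Int.mod_nonneg _ hw
            have hml : PySem.Int.mod (k : Int) w < w := PySem.Int.mod_lt _ hw
            have heq : PySem.Int.floordiv (k : Int) w * w + PySem.Int.mod (k : Int) w = (k : Int) :=
              PySem.Int.floordiv_mul_add_mod _ _
            have hdx := H (PySem.Int.mod (k : Int) w - x)
              (PySem.List.mem_pyRange_one.mpr (by omega))
            rw [List.all_eq_true] at hdx
            have hcell := hdx (PySem.Int.floordiv (k : Int) w - y)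
              (PySem.List.mem_pyRange_one.mpr (by omega))
            simp only [cellA, Bool.and_eq_true, beq_iff_eq] at hcell
            have hx' : x + (PySem.Int.mod (k : Int) w - x) = PySem.Int.mod (k : Int) w := by ring
            have hy' : y + (PySem.Int.floordiv (k : Int) w - y) = PySem.Int.floordiv (k : Int) w := by ring
            rw [hx', hy', heq] at hcell
            have hget : PySem.List.pyGetD data (k : Int) 0 = data[k] := by
              rw [PySem.List.pyGetD_natCast, List.getD_eq_getElem _ _ hk]
            exact hv (hget ▸ hcell.2)
        · -- flat scan safe → square scan safe
          intro H dx hdx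
          rw [List.all_eq_true]
          intro dy hdy
          rw [PySem.List.mem_pyRange_one] at hdx hdy
          simp only [cellA, Bool.and_eq_true, beq_iff_eq, Bool.not_eq_true',
            Bool.or_eq_false_iff, decide_eq_false_iff_not, not_lt, not_le]
          refine ⟨⟨⟨⟨by omega, by omega⟩, by omega⟩, by omega⟩, ?_⟩
          set nx := x + dx with hnx
          set ny := y + dy with hny
          have hnyw : 0 ≤ ny * w := mul_nonneg (by omega) (by omega)
          have hj0 : 0 ≤ ny * w + nx := by linarith [hnyw]
          have hb1 : (ny + 1) * w ≤ h * w := by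
            apply mul_le_mul_of_nonneg_right (by omega) (by omega)
          have he : (ny + 1) * w = ny * w + w := by ring
          have hj1 : ny * w + nx < h * w := by linarith
          have hwh : h * w = w * h := by ring
          have hklen : (ny * w + nx) < (data.length : Int) := by
            rw [hwh] at hj1; linarith
          -- name the flat index as a Nat
          have hjk : ((ny * w + nx).toNat : Int) = ny * w + nx := Int.toNat_of_nonneg hj0
          have hkl : (ny * w + nx).toNat < data.length := by omega
          have hfd : PySem.Int.floordiv (ny * w + nx) w = ny := by
            rw [PySem.Int.floordiv_eq_iff_of_pos hw]
            constructor
            · linarith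
            · linarith [he]
          have hmd : PySem.Int.mod (ny * w + nx) w = nx := by
            have := PySem.Int.floordiv_mul_add_mod (ny * w + nx) w
            rw [hfd] at this
            linarith
          by_cases hz : data[(ny * w + nx).toNat] = 0
          · rw [PySem.List.pyGetD_eq_getElem data 0 hj0 hklen]
            exact hz
          · exfalso
            have hmem : ((0 : Int) + ((ny * w + nx).toNat : Int), data[(ny * w + nx).toNat]) ∈
                PySem.List.enumerate data 0 :=
              (PySem.List.mem_enumerate_iff _ _ _).mpr ⟨(ny * w + nx).toNat, hkl, rfl⟩
            have := H _ hmem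
            rw [if_pos (by simpa using hz)] at this
            simp only [zero_add, hjk, hfd, hmd] at this
            simp only [Bool.not_eq_eq_eq_not, Bool.not_true, Bool.and_eq_false_iff,
              decide_eq_false_iff_not] at this
            rcases this with hc | hc <;> [exact hc (by omega); exact hc (by omega)]
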